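-- pv_equiv track=rewrite | github.com/gergely-flamich/miracle-compression | code/compression/binary_io.py | to_bit_string
-- ===== SOURCE A (Python) =====
-- def to_bit_string(num, num_bits):
--
--     if num >= 2**num_bits:
--         raise Exception("The number {} (>= {}) is bigger than what we can encode!".format(num, 2**num_bits))
--
--     bitcode = []
--
--     for i in range(num_bits):
--         bitcode.append(str(num % 2))
--
--         num //= 2
--
--     return ''.join(bitcode)
-- ===== SOURCE B (Python) =====
-- def to_bit_string(num, num_bits):
--     if num >= 2 ** num_bits:
--         raise Exception("The number {} (>= {}) is bigger than what we can encode!".format(num, 2 ** num_bits))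
--     if num_bits <= 0:
--         return ''
--     m = num % (1 << num_bits)  # two's-complement value also for negative num
--     return format(m, 'b')[::-1].ljust(num_bits, '0')
-- ===== Notes on version B (the rewrite author's own statement) =====
-- stated objective: faster
-- what changed: Replaces the bit-by-bit Python append loop with one formatting step: reduce num modulo 2**num_bits, take format(m,'b'), reverse it to LSB-first and right-pad with '0' to num_bits.
import Mathlib
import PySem

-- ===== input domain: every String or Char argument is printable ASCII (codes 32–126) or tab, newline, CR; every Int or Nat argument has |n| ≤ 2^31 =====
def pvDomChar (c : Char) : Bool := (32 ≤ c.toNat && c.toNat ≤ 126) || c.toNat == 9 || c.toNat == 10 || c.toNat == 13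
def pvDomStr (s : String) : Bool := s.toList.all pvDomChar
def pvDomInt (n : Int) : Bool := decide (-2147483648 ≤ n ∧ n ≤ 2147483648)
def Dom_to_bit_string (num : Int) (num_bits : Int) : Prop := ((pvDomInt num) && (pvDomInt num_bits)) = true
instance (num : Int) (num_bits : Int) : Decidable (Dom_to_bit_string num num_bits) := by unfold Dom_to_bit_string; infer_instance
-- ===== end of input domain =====

-- B replaces A's bit-by-bit append loop with one formatting step (format(m,'b') reversed, right-padded);
-- same return value everywhere A returns, and B raises exactly where A raises (excluded by Pre_).

-- ===== PORT A =====
-- the 'raise' branch (num >= 2**num_bits) is excluded by Pre_to_bit_string below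
def to_bit_string (num : Int) (num_bits : Int) : String :=
  PySem.Str.join ""
    ((PySem.List.pyRange 0 num_bits 1).foldl
      (fun (st : List String × Int) _i =>
        (st.1 ++ [PySem.Int.toStr (PySem.Int.mod st.2 2)], PySem.Int.floordiv st.2 2))
      ([], num)).1

-- ===== PORT B =====
-- the 'raise' branch is the same guard as A's, excluded by Pre_to_bit_string;
-- s[::-1] is List.reverse (PySem.Str.slice?_none_none_neg_one) and .ljust(w,'0') is
-- right-padding with '0' to width w — ported by hand, exact on these '0'/'1' ASCII strings
-- cs[::-1].ljust(w, '0') : reverse then right-pad with '0' to width w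
def revLjust0 (cs : List Char) (w : Nat) : String :=
  String.ofList (cs.reverse ++ List.replicate (w - cs.length) '0')

def to_bit_string_alt (num : Int) (num_bits : Int) : String :=
  if num_bits ≤ 0 then "" else
    revLjust0 (PySem.Int.toBinChars (PySem.Int.mod num (2 ^ num_bits.toNat))) num_bits.toNat

-- ===== PRECONDITION & SPEC =====
-- Pre_ excludes exactly the inputs where A (and B) raise: num >= 2**num_bits.  For num_bits < 0
-- Python's 2**num_bits is a float in (0,1], and an int num reaches it iff num ≥ 1 = 2^0, so
-- 'num < 2 ^ num_bits.toNat' states the guard exactly for every num_bits.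
def Pre_to_bit_string (num : Int) (num_bits : Int) : Prop := num < 2 ^ num_bits.toNat
instance (num : Int) (num_bits : Int) : Decidable (Pre_to_bit_string num num_bits) := by
  unfold Pre_to_bit_string; infer_instance
def pvWitness_to_bit_string : Int × Int := (5, 4)
def Spec_to_bit_string (num : Int) (num_bits : Int) (out : String) : Prop := out = to_bit_string_alt num num_bits
instance (num : Int) (num_bits : Int) (out : String) : Decidable (Spec_to_bit_string num num_bits out) := by unfold Spec_to_bit_string; infer_instance

-- ===== CLAIM (what is proved, stated in full; the proofs are below) =====
def Claim_equal_to_bit_string : Prop := ∀ (num : Int) (num_bits : Int), Dom_to_bit_string num num_bits → Pre_to_bit_string num num_bits → Spec_to_bit_string num num_bits (to_bit_string num num_bits)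

-- ===== LEMMAS AND PROOFS =====

-- LSB-first bit strings of x, as A's loop produces them
def bitsStr : Nat → Int → List String
  | 0, _ => []
  | k + 1, x => PySem.Int.toStr (PySem.Int.mod x 2) :: bitsStr k (PySem.Int.floordiv x 2)

-- LSB-first bit chars of a Nat, padded to length n
def natBits : Nat → Nat → List Char
  | 0, _ => []
  | k + 1, m => Nat.digitChar (m % 2) :: natBits k (m / 2)

lemma foldA (l : List Int) : ∀ (acc : List String) (x : Int),
    (l.foldl
      (fun (st : List String × Int) _i =>
        (st.1 ++ [PySem.Int.toStr (PySem.Int.mod st.2 2)], PySem.Int.floordiv st.2 2))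
      (acc, x)).1 = acc ++ bitsStr l.length x := by
  induction l with
  | nil => intro acc x; simp [bitsStr]
  | cons a l ih =>
      intro acc x
      simp only [List.foldl_cons, List.length_cons, bitsStr, ih]
      simp

lemma am1 (k : Nat) (x : Int) :
    PySem.Int.mod x 2 = (((PySem.Int.mod x (2 ^ (k + 1))).toNat % 2 : Nat) : Int) := by
  rw [PySem.Int.mod_eq_emod_of_pos (show (0:Int) < 2 ^ (k + 1) by positivity),
      PySem.Int.mod_eq_emod_of_pos (show (0:Int) < 2 by norm_num)]
  have h0 : (0:Int) ≤ x % 2 ^ (k + 1) := Int.emod_nonneg x (by positivity)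
  have h2 : (x % 2 ^ (k + 1)) % 2 = x % 2 := Int.emod_emod_of_dvd x ⟨2 ^ k, by ring⟩
  push_cast [Int.toNat_of_nonneg h0]
  omega

lemma am2 (k : Nat) (x : Int) :
    (PySem.Int.mod (PySem.Int.floordiv x 2) (2 ^ k)).toNat
      = (PySem.Int.mod x (2 ^ (k + 1))).toNat / 2 := by
  rw [PySem.Int.floordiv_eq_ediv_of_pos (show (0:Int) < 2 by norm_num),
      PySem.Int.mod_eq_emod_of_pos (show (0:Int) < 2 ^ k by positivity),
      PySem.Int.mod_eq_emod_of_pos (show (0:Int) < 2 ^ (k + 1) by positivity)]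
  have hp : (0:Int) < 2 ^ k := by positivity
  set p : Int := 2 ^ k with hpdef
  have h2p : (2:Int) ^ (k + 1) = 2 * p := by rw [hpdef]; ring
  rw [h2p]
  set q := x / (2 * p) with hq
  set r := x % (2 * p) with hr
  have hx : 2 * p * q + r = x := (Int.mul_ediv_add_emod x (2 * p))
  have hr0 : 0 ≤ r := Int.emod_nonneg x (by omega)
  have hrlt : r < 2 * p := Int.emod_lt_of_pos x (by omega)
  have hx2 : x / 2 = p * q + r / 2 := by
    have hxr : x = r + 2 * (p * q) := by linear_combination -hx
    rw [hxr, Int.add_mul_ediv_left r (p * q) (by norm_num : (2:Int) ≠ 0), add_comm]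
  have hrd0 : 0 ≤ r / 2 := by omega
  have hrdlt : r / 2 < p := by omega
  have hmod : x / 2 % p = r / 2 := by
    rw [hx2, add_comm, Int.add_mul_emod_self_left, Int.emod_eq_of_lt hrd0 hrdlt]
  rw [hmod]
  omega

lemma toStr_bit (m : Nat) (hm : m < 2) :
    PySem.Int.toStr ((m : Nat) : Int) = String.ofList [Nat.digitChar m] := by
  interval_cases m <;> decide

lemma bitsChars : ∀ (k : Nat) (x : Int),
    bitsStr k x = (natBits k ((PySem.Int.mod x (2 ^ k)).toNat)).map (fun c => String.ofList [c]) := by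
  intro k
  induction k with
  | zero => intro x; simp [bitsStr, natBits]
  | succ k ih =>
      intro x
      simp only [bitsStr, natBits, List.map_cons]
      rw [am1 k x, toStr_bit _ (Nat.mod_lt _ (by norm_num)), ih, am2 k x]

lemma natBits_zero : ∀ k, natBits k 0 = List.replicate k '0' := by
  intro k; induction k with
  | zero => rfl
  | succ k ih =>
      simp only [natBits, ih, List.replicate_succ, Nat.zero_mod, Nat.zero_div]
      rfl

-- unfolding lemmas for core's Nat.toDigits (used by PySem.Int.toBinChars = format(·,'b'))
lemma tdc_append : ∀ (f n : Nat) (l : List Char),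
    Nat.toDigitsCore 2 f n l = Nat.toDigitsCore 2 f n [] ++ l := by
  intro f
  induction f with
  | zero => intro n l; simp [Nat.toDigitsCore]
  | succ f ih =>
      intro n l
      simp only [Nat.toDigitsCore]
      by_cases h : n / 2 = 0
      · simp [h]
      · simp only [h, if_false]
        rw [ih (n / 2) (Nat.digitChar (n % 2) :: l), ih (n / 2) [Nat.digitChar (n % 2)]]
        simp

lemma tdc_fuel : ∀ (f g n : Nat) (l : List Char), 0 < f → 0 < g → n < 2 ^ f → n < 2 ^ g →
    Nat.toDigitsCore 2 f n l = Nat.toDigitsCore 2 g n l := by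
  intro f
  induction f with
  | zero => intro g n l hf; omega
  | succ f ih =>
      intro g n l _ hg hnf hng
      obtain ⟨g, rfl⟩ : ∃ g', g = g' + 1 := ⟨g - 1, by omega⟩
      simp only [Nat.toDigitsCore]
      by_cases h : n / 2 = 0
      · simp [h]
      · simp only [h, if_false]
        have hn2 : 2 ≤ n := by omega
        have hf' : 0 < f := by
          by_contra hc
          have hf0 : f = 0 := by omega
          subst hf0; simp at hnf; omega
        have hg' : 0 < g := by
          by_contra hc
          have hg0 : g = 0 := by omega
          subst hg0; simp at hng; omega
        exact ih g (n / 2) _ hf' hg'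
          (by have hpf : (2:Nat) ^ (f + 1) = 2 ^ f * 2 := pow_succ 2 f; omega)
          (by have hpg : (2:Nat) ^ (g + 1) = 2 ^ g * 2 := pow_succ 2 g; omega)

lemma tstep (m : Nat) (hm : 2 ≤ m) :
    Nat.toDigits 2 m = Nat.toDigits 2 (m / 2) ++ [Nat.digitChar (m % 2)] := by
  have h : m / 2 ≠ 0 := by omega
  show Nat.toDigitsCore 2 (m + 1) m [] = _
  simp only [Nat.toDigitsCore, h, if_false]
  rw [tdc_append m (m / 2) [Nat.digitChar (m % 2)]]
  congr 1
  have h1 : m / 2 < 2 ^ m :=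
    lt_of_lt_of_le Nat.lt_two_pow_self (Nat.pow_le_pow_right (by norm_num) (by omega))
  exact tdc_fuel m (m / 2 + 1) (m / 2) [] (by omega) (by omega) h1
    (lt_of_lt_of_le Nat.lt_two_pow_self (Nat.pow_le_pow_right (by norm_num) (Nat.le_succ _)))

lemma natBits_eq : ∀ (n m : Nat), 1 ≤ n → m < 2 ^ n →
    natBits n m = (Nat.toDigits 2 m).reverse
      ++ List.replicate (n - (Nat.toDigits 2 m).length) '0' := by
  intro n
  induction n with
  | zero => intro m hn; omega
  | succ n ih =>
      intro m _ hm
      by_cases h2 : m < 2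
      · interval_cases m
        · have h0 : Nat.toDigits 2 0 = ['0'] := by decide
          simp [natBits, natBits_zero, h0, show Nat.digitChar 0 = '0' from rfl]
        · have h1 : Nat.toDigits 2 1 = ['1'] := by decide
          simp [natBits, natBits_zero, h1, show Nat.digitChar 1 = '1' from rfl]
      · have hstep := tstep m (by omega)
        have hdiv : m / 2 < 2 ^ n := by
          have hps : (2:Nat) ^ (n + 1) = 2 ^ n * 2 := pow_succ 2 n
          omega
        have hn1 : 1 ≤ n := by
          by_contra hc
          have hn0 : n = 0 := by omega
          subst hn0; omega
        simp only [natBits, ih (m / 2) hn1 hdiv, hstep, List.reverse_append, List.length_append,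
          List.reverse_singleton, List.length_singleton, List.cons_append]
        rw [Nat.succ_sub_succ]
        simp

-- ===== VERDICT (by name: the statement is the Claim_ definition above) =====
theorem to_bit_string_spec : Claim_equal_to_bit_string := by
  intro num num_bits _hd _hpre
  unfold Spec_to_bit_string to_bit_string to_bit_string_alt revLjust0
  apply String.toList_inj.mp
  rw [foldA]
  simp only [PySem.List.length_pyRange_one]
  by_cases hnb : num_bits ≤ 0
  · have h0 : (num_bits - 0).toNat = 0 := by omega
    rw [h0]
    simp [bitsStr, hnb]
  · have h0 : (num_bits - 0).toNat = num_bits.toNat := by omega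
    rw [h0, if_neg hnb, bitsChars]
    set n := num_bits.toNat with hn
    have hnpos : 1 ≤ n := by omega
    have hmp : (0:Int) < 2 ^ n := by positivity
    have hm0 : (0:Int) ≤ PySem.Int.mod num (2 ^ n) := PySem.Int.mod_nonneg num hmp
    have hmlt : PySem.Int.mod num (2 ^ n) < 2 ^ n := PySem.Int.mod_lt num hmp
    set m := (PySem.Int.mod num (2 ^ n)).toNat with hm
    have hcs : PySem.Int.toBinChars (PySem.Int.mod num (2 ^ n)) = Nat.toDigits 2 m := by
      unfold PySem.Int.toBinChars
      rw [if_neg (by omega)]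
    have hmlt' : m < 2 ^ n := by
      have hc : ((2:Int) ^ n) = ((2 ^ n : Nat) : Int) := by push_cast; ring
      omega
    rw [PySem.Str.toList_join]
    simp only [List.nil_append, List.map_map, Function.comp_def, String.toList_ofList,
      String.toList_empty, hcs]
    rw [PySem.Chars.join_nil_singletons, natBits_eq n m hnpos hmlt']
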